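-- pv_equiv track=rewrite | github.com/pypi-data/pypi-mirror-383 | packages/quickbars-bridge/quickbars_bridge-0.0.6.tar.gz/quickbars_bridge-0.0.6/src/quickbars_bridge/qb.py | unique_qb_name
-- ===== SOURCE A (Python) =====
-- from typing import Iterable, Dict, Any, Set, List, Tuple
--
-- def unique_qb_name(base: str, existing_names: Iterable[str]) -> str:
--     """Return 'Base N' not present (case-insensitive) in existing_names."""
--     ci: Set[str] = { (n or "").strip().casefold() for n in existing_names }
--     i = 1
--     while True:
--         candidate = f"{base} {i}"
--         if candidate.casefold() not in ci:
--             return candidate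
--         i += 1
-- ===== SOURCE B (Python) =====
-- def unique_qb_name(base, existing_names):
--     """Return 'Base N' not present (case-insensitive) in existing_names."""
--     names = list(existing_names)
--     n = len(names)
--     p = (base + " ").casefold()
--     k = len(p)
--     idx = {str(i): i for i in range(1, n + 2)}  # the answer's index is at most n+1
--     taken = [False] * (n + 2)
--     for nm in names:
--         m = (nm or "").strip().casefold()
--         if m.startswith(p):
--             j = idx.get(m[k:])
--             if j is not None:
--                 taken[j] = True
--     i = 1
--     while taken[i]:
--         i += 1
--     return f"{base} {i}"
-- ===== Notes on version B (the rewrite author's own statement) =====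
-- stated objective: alternative
-- what changed: B inverts the search: instead of A's unbounded loop probing the set of all lowered names with a freshly built candidate per iteration, B builds a table mapping the n+1 possible numeric suffixes to their indices, sweeps the names a single time marking a boolean array of taken indices, and scans that array for the first unmarked index.
import Mathlib
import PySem

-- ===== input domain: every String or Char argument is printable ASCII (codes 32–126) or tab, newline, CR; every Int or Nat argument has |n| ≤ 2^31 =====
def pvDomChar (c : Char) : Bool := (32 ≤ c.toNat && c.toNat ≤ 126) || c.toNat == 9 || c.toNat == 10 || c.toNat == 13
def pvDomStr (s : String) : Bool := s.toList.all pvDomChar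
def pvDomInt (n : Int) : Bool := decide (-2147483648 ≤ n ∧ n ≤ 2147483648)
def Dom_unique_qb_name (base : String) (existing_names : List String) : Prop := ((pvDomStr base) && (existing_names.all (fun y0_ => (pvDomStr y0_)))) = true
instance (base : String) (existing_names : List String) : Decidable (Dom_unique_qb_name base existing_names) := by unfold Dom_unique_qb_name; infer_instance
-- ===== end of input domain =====

-- B inverts the search: it indexes the n+1 possible candidates in a dict once, sweeps
-- the names a single time marking a boolean table of taken indices, and scans that
-- table for the first unmarked index — instead of A's unbounded loop probing the set
-- of all lowered names with a freshly built candidate per iteration (alternative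
-- algorithm; casefold is ported as lower, exact on the ASCII domain Dom).

-- ===== PORT A =====
-- A's 'while True' as fuel recursion; fuel existing.length+1 always suffices in
-- Python (lowered candidates are pairwise distinct, ci has ≤ existing.length elements)
def uqnLoopA (base : String) (ci : PySem.Set String) : Nat → Int → String
  | 0, _ => ""
  | f+1, i =>
    let candidate := base ++ " " ++ PySem.Int.toStr i
    if PySem.Str.lower candidate ∈ ci then uqnLoopA base ci f (i+1) else candidate

def unique_qb_name (base : String) (existing_names : List String) : String :=
  -- '(n or "")' is the identity on str arguments
  let ci : PySem.Set String :=
    PySem.Set.ofList (existing_names.map (fun n => PySem.Str.lower (PySem.Str.strip n)))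
  uqnLoopA base ci (existing_names.length + 1) 1

-- ===== PORT B =====
-- idx = {str(i): i for i in range(1, n+2)}: the answer's index is at most n+1
def uqnIdx (n : Nat) : PySem.Dict String Int :=
  (PySem.List.pyRange 1 ((n : Int) + 2) 1).foldl
    (fun d i => d.insert (PySem.Int.toStr i) i) PySem.Dict.empty

-- one marking step: m = norm(nm); if m.startswith(p): j = idx.get(m[k:]); if j is not
-- None: taken[j] = True  (idx's values j lie in [1, n+1], inside taken's range: plain
-- List.set is exact for Python's taken[j] = True)
def uqnMark (p : String) (k : Int) (idx : PySem.Dict String Int)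
    (taken : List Bool) (nm : String) : List Bool :=
  let m := PySem.Str.lower (PySem.Str.strip nm)
  if PySem.Str.startswith m p then
    match idx.get? (PySem.Str.slice m (some k) none) with
    | some j => taken.set j.toNat true
    | none => taken
  else taken

-- 'while taken[i]: i += 1' as fuel recursion; the scan never leaves [1, n+1] in Python
-- (some index there is unmarked), so fuel n+2 and in-range getD are exact
def uqnScan (taken : List Bool) : Nat → Int → Int
  | 0, i => i
  | f+1, i => if taken.getD i.toNat false then uqnScan taken f (i+1) else i

def unique_qb_name_alt (base : String) (existing_names : List String) : String :=
  let n := existing_names.length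
  let p := PySem.Str.lower (base ++ " ")
  let k := PySem.Str.len p
  let taken := existing_names.foldl (uqnMark p k (uqnIdx n)) (List.replicate (n + 2) false)
  base ++ " " ++ PySem.Int.toStr (uqnScan taken (n + 2) 1)

-- ===== PRECONDITION & SPEC =====
def Spec_unique_qb_name (base : String) (existing_names : List String) (out : String) : Prop := out = unique_qb_name_alt base existing_names
instance (base : String) (existing_names : List String) (out : String) : Decidable (Spec_unique_qb_name base existing_names out) := by unfold Spec_unique_qb_name; infer_instance

-- ===== CLAIM (what is proved, stated in full; the proofs are below) =====
def Claim_equal_unique_qb_name : Prop := ∀ (base : String) (existing_names : List String), Dom_unique_qb_name base existing_names → Spec_unique_qb_name base existing_names (unique_qb_name base existing_names)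

-- ===== LEMMAS AND PROOFS =====

-- the lowered candidate for index i
def uqnKey (base : String) (i : Int) : String :=
  PySem.Str.lower (base ++ " " ++ PySem.Int.toStr i)

theorem lowerChar_digitChar (m : Nat) :
    PySem.Chars.lowerChar (Nat.digitChar m) = Nat.digitChar m := by
  rcases Nat.lt_or_ge m 16 with h | h
  · interval_cases m <;> decide
  · have h2 : Nat.digitChar m = '*' := by
      unfold Nat.digitChar
      repeat rw [if_neg (by omega)]
    rw [h2]; decide

theorem toDigitsCore_lower (f : Nat) : ∀ (n : Nat) (acc : List Char),
    (∀ c ∈ acc, PySem.Chars.lowerChar c = c) →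
    ∀ c ∈ Nat.toDigitsCore 10 f n acc, PySem.Chars.lowerChar c = c := by
  induction f with
  | zero => intro n acc h c hc; exact h c hc
  | succ f ih =>
    intro n acc h c hc
    simp only [Nat.toDigitsCore] at hc
    by_cases h10 : n / 10 = 0
    · rw [if_pos h10] at hc
      rcases List.mem_cons.mp hc with h1 | h1
      · rw [h1]; exact lowerChar_digitChar _
      · exact h c h1
    · rw [if_neg h10] at hc
      refine ih (n / 10) _ ?_ c hc
      intro d hd
      rcases List.mem_cons.mp hd with h1 | h1
      · rw [h1]; exact lowerChar_digitChar _
      · exact h d h1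

theorem lower_toChars {i : Int} (h : 1 ≤ i) :
    PySem.Chars.lower (PySem.Int.toChars i) = PySem.Int.toChars i := by
  unfold PySem.Int.toChars PySem.Chars.lower
  rw [if_neg (by omega)]
  calc List.map PySem.Chars.lowerChar (Nat.toDigits 10 i.toNat)
      = List.map id (Nat.toDigits 10 i.toNat) := by
        apply List.map_congr_left
        intro c hc
        exact toDigitsCore_lower _ _ _ (by intro c hc; simp at hc) c hc
    _ = Nat.toDigits 10 i.toNat := List.map_id _

-- the lowered candidate splits as lowered prefix ++ the digits of i
theorem lower_cand (base : String) {i : Int} (h : 1 ≤ i) :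
    (uqnKey base i).toList
      = (PySem.Str.lower (base ++ " ")).toList ++ PySem.Int.toChars i := by
  simp only [uqnKey, PySem.Str.toList_lower, String.toList_append, PySem.Int.toList_toStr,
    PySem.Chars.lower, List.map_append]
  rw [show List.map PySem.Chars.lowerChar (PySem.Int.toChars i) = PySem.Int.toChars i from
    lower_toChars h]

-- decimal digits are injective, via the evaluation map
def pvDigitsVal (cs : List Char) : Nat := cs.foldl (fun a c => 10 * a + (c.toNat - 48)) 0

theorem digitChar_toNat {m : Nat} (h : m < 10) : (Nat.digitChar m).toNat = m + 48 := by
  interval_cases m <;> decide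

theorem digitsVal_toDigits (n : Nat) : pvDigitsVal (Nat.toDigits 10 n) = n := by
  induction n using Nat.strong_induction_on with
  | _ n ih =>
    rw [Nat.toDigits_eq_if (by norm_num)]
    by_cases h : n < 10
    · rw [if_pos h]
      simp [pvDigitsVal, digitChar_toNat h]
    · rw [if_neg h]
      have hlt : n / 10 < n := Nat.div_lt_self (by omega) (by norm_num)
      have hv := ih (n / 10) hlt
      have hm : (Nat.digitChar (n % 10)).toNat = n % 10 + 48 :=
        digitChar_toNat (Nat.mod_lt _ (by norm_num))
      simp only [pvDigitsVal, List.foldl_append, List.foldl_cons, List.foldl_nil] at *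
      rw [hv, hm]
      omega

theorem toDigits_inj {a b : Nat} (h : Nat.toDigits 10 a = Nat.toDigits 10 b) : a = b := by
  have := congrArg pvDigitsVal h
  rwa [digitsVal_toDigits, digitsVal_toDigits] at this

theorem toStr_inj {i j : Int} (hi : 1 ≤ i) (hj : 1 ≤ j)
    (h : PySem.Int.toStr i = PySem.Int.toStr j) : i = j := by
  have hl := congrArg String.toList h
  rw [PySem.Int.toList_toStr, PySem.Int.toList_toStr] at hl
  unfold PySem.Int.toChars at hl
  rw [if_neg (by omega), if_neg (by omega)] at hl
  have := toDigits_inj hl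
  omega

theorem key_inj (base : String) {i j : Int} (hi : 1 ≤ i) (hj : 1 ≤ j)
    (h : uqnKey base i = uqnKey base j) : i = j := by
  have hl := congrArg String.toList h
  rw [lower_cand base hi, lower_cand base hj] at hl
  have hc : PySem.Int.toChars i = PySem.Int.toChars j := List.append_cancel_left hl
  unfold PySem.Int.toChars at hc
  rw [if_neg (by omega), if_neg (by omega)] at hc
  have := toDigits_inj hc
  omega

theorem idx_nodup_keys (n : Nat) : (uqnIdx n).keys.Nodup := by
  unfold uqnIdx
  exact PySem.Dict.nodup_keys_foldl_insert_key _ (fun i => PySem.Int.toStr i)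
    (fun _ i => i) _ (by simp [PySem.Dict.keys_empty])

theorem idx_items (n : Nat) :
    (uqnIdx n).items
      = (PySem.List.pyRange 1 ((n : Int) + 2) 1).map (fun i => (PySem.Int.toStr i, i)) := by
  have h := PySem.Dict.items_foldl_insert_fresh (PySem.List.pyRange 1 ((n : Int) + 2) 1)
    (fun i => PySem.Int.toStr i) (fun i => i) PySem.Dict.empty
    (by intro a _; simp [PySem.Dict.contains_empty])
    (by
      refine (PySem.List.nodup_pyRange_one 1 ((n : Int) + 2)).map_on ?_
      intro x hx y hy hxy
      exact toStr_inj ((PySem.List.mem_pyRange_one.mp hx).1)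
        ((PySem.List.mem_pyRange_one.mp hy).1) hxy)
  unfold uqnIdx
  exact h.trans (by simp [PySem.Dict.empty])

theorem idx_get? (n : Nat) (m : String) (j : Int) :
    (uqnIdx n).get? m = some j
      ↔ (1 ≤ j ∧ j < (n : Int) + 2 ∧ m = PySem.Int.toStr j) := by
  rw [PySem.Dict.get?_eq_some_iff_mem_items _ m j (idx_nodup_keys n), idx_items]
  simp only [List.mem_map, PySem.List.mem_pyRange_one, Prod.mk.injEq]
  constructor
  · rintro ⟨i, ⟨h1, h2⟩, hk, rfl⟩
    exact ⟨h1, h2, hk.symm⟩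
  · rintro ⟨h1, h2, rfl⟩
    exact ⟨j, ⟨h1, h2⟩, rfl, rfl⟩

-- the option value a marking step reacts to
def uqnGet (p : String) (k : Int) (idx : PySem.Dict String Int) (nm : String) : Option Int :=
  let m := PySem.Str.lower (PySem.Str.strip nm)
  if PySem.Str.startswith m p then idx.get? (PySem.Str.slice m (some k) none) else none

theorem uqnMark_eq (p : String) (k : Int) (idx : PySem.Dict String Int)
    (taken : List Bool) (nm : String) :
    uqnMark p k idx taken nm
      = match uqnGet p k idx nm with
        | some j => taken.set j.toNat true
        | none => taken := by
  unfold uqnMark uqnGet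
  simp only []
  cases h : PySem.Str.startswith (PySem.Str.lower (PySem.Str.strip nm)) p <;> simp

theorem append_eq_iff_prefix_drop {P D M : List Char} :
    M = P ++ D ↔ (P <+: M ∧ M.drop P.length = D) := by
  constructor
  · rintro rfl; exact ⟨List.prefix_append _ _, List.drop_left⟩
  · rintro ⟨⟨t, rfl⟩, hd⟩
    rw [List.drop_left] at hd
    rw [hd]

-- a name marks index i exactly when its normal form IS the lowered candidate i
theorem uqnGet_some (base : String) (n : Nat) (nm : String) {i : Int}
    (hi1 : 1 ≤ i) (hi2 : i < (n : Int) + 2) :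
    (uqnGet (PySem.Str.lower (base ++ " ")) (PySem.Str.len (PySem.Str.lower (base ++ " ")))
        (uqnIdx n) nm = some i)
      ↔ PySem.Str.lower (PySem.Str.strip nm) = uqnKey base i := by
  unfold uqnGet
  set m := PySem.Str.lower (PySem.Str.strip nm) with hm
  set p := PySem.Str.lower (base ++ " ") with hp
  have hlen : PySem.Str.len p = (p.toList.length : Int) := PySem.Str.len_eq p
  constructor
  · intro hg
    by_cases hs : PySem.Str.startswith m p = true
    · rw [if_pos hs, idx_get? n _ i] at hg
      obtain ⟨_, _, hsl⟩ := hg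
      rw [PySem.Str.startswith_eq, PySem.Chars.startswith_iff] at hs
      have hdrop : m.toList.drop p.toList.length = PySem.Int.toChars i := by
        have := congrArg String.toList hsl
        rw [PySem.Str.toList_slice, PySem.Int.toList_toStr] at this
        rw [show PySem.Chars.slice m.toList (some (PySem.Str.len p)) none
              = PySem.List.slice m.toList (some (PySem.Str.len p)) none from rfl,
          hlen, PySem.List.slice_from _ (by positivity), Int.toNat_natCast] at this
        exact this
      apply String.toList_inj.mp
      rw [lower_cand base hi1]
      exact append_eq_iff_prefix_drop.mpr ⟨hs, hdrop⟩
    · rw [if_neg hs] at hg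
      exact absurd hg (by simp)
  · intro he
    have hl : m.toList = p.toList ++ PySem.Int.toChars i := by
      rw [he, lower_cand base hi1]
    have hpd := append_eq_iff_prefix_drop.mp hl
    rw [if_pos (by rw [PySem.Str.startswith_eq, PySem.Chars.startswith_iff]; exact hpd.1)]
    rw [idx_get? n _ i]
    refine ⟨hi1, hi2, ?_⟩
    apply String.toList_inj.mp
    rw [PySem.Str.toList_slice, PySem.Int.toList_toStr]
    show PySem.List.slice m.toList (some (PySem.Str.len p)) none = PySem.Int.toChars i
    rw [hlen, PySem.List.slice_from _ (by positivity), Int.toNat_natCast]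
    exact hpd.2

theorem mark_getD (p : String) (kk : Int) (idx : PySem.Dict String Int) (L : Nat)
    (hval : ∀ nm j, uqnGet p kk idx nm = some j → 1 ≤ j ∧ j.toNat < L) :
    ∀ (names : List String) (bs : List Bool) (i : Nat), bs.length = L →
      (names.foldl (uqnMark p kk idx) bs).getD i false
        = (bs.getD i false
            || names.any (fun nm => uqnGet p kk idx nm == some (i : Int))) := by
  intro names
  induction names with
  | nil => intro bs i _; simp
  | cons nm names ih =>
    intro bs i hlen
    simp only [List.foldl_cons, List.any_cons, uqnMark_eq p kk idx bs nm]
    rcases h : uqnGet p kk idx nm with _ | j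
    · rw [ih bs i hlen]
      simp
    · have hj := hval _ _ h
      rw [ih _ i (by simp [hlen])]
      have hset : (bs.set j.toNat true).getD i false
          = (bs.getD i false || decide (j = (i : Int))) := by
        rw [List.getD_eq_getElem?_getD, List.getD_eq_getElem?_getD, List.getElem?_set]
        by_cases hji : j = (i : Int)
        · rw [if_pos (by omega), if_pos (by omega)]
          simp [hji]
        · rw [if_neg (by omega)]
          simp [hji]
      rw [hset]
      by_cases hji : j = (i : Int) <;> simp [hji, Bool.or_assoc, Bool.or_comm]

theorem pigeonhole_free (base : String) (names : List String) :
    ∃ j : Int, 1 ≤ j ∧ j < (names.length : Int) + 2 ∧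
      uqnKey base j ∉
        PySem.Set.ofList (names.map (fun nm => PySem.Str.lower (PySem.Str.strip nm))) := by
  by_contra hcon
  push Not at hcon
  set N := names.map (fun nm => PySem.Str.lower (PySem.Str.strip nm)) with hN
  set l := (PySem.List.pyRange 1 ((names.length : Int) + 2) 1).map (uqnKey base) with hl
  have hnodup : l.Nodup := by
    refine (PySem.List.nodup_pyRange_one 1 ((names.length : Int) + 2)).map_on ?_
    intro x hx y hy hxy
    exact key_inj base ((PySem.List.mem_pyRange_one.mp hx).1)
      ((PySem.List.mem_pyRange_one.mp hy).1) hxy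
  have hsub : l ⊆ N := by
    intro x hx
    rw [hl, List.mem_map] at hx
    obtain ⟨i, hi, rfl⟩ := hx
    obtain ⟨hi1, hi2⟩ := PySem.List.mem_pyRange_one.mp hi
    exact (PySem.Set.mem_ofList _ _).mp (hcon i hi1 hi2)
  have hlen1 : l.length = names.length + 1 := by
    rw [hl, List.length_map, PySem.List.length_pyRange_one]
    omega
  have hlen2 : N.length = names.length := List.length_map ..
  have h1 : l.toFinset.card = l.length := List.toFinset_card_of_nodup hnodup
  have h2 : l.toFinset ⊆ N.toFinset := by
    intro x hx
    rw [List.mem_toFinset] at *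
    exact hsub hx
  have h3 := Finset.card_le_card h2
  have h4 := N.toFinset_card_le
  omega

theorem taken_getD (base : String) (names : List String) {k : Int}
    (hk1 : 1 ≤ k) (hk2 : k < (names.length : Int) + 2) :
    ((names.foldl
        (uqnMark (PySem.Str.lower (base ++ " "))
          (PySem.Str.len (PySem.Str.lower (base ++ " "))) (uqnIdx names.length))
        (List.replicate (names.length + 2) false)).getD k.toNat false = true)
      ↔ uqnKey base k ∈
          PySem.Set.ofList (names.map (fun nm => PySem.Str.lower (PySem.Str.strip nm))) := by
  have hval : ∀ nm j,
      uqnGet (PySem.Str.lower (base ++ " "))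
        (PySem.Str.len (PySem.Str.lower (base ++ " "))) (uqnIdx names.length) nm = some j →
      1 ≤ j ∧ j.toNat < names.length + 2 := by
    intro nm j hg
    unfold uqnGet at hg
    by_cases hs : PySem.Str.startswith (PySem.Str.lower (PySem.Str.strip nm))
        (PySem.Str.lower (base ++ " ")) = true
    · rw [if_pos hs] at hg
      obtain ⟨h1, h2, _⟩ := (idx_get? names.length _ j).mp hg
      omega
    · rw [if_neg hs] at hg
      exact absurd hg (by simp)
  rw [mark_getD _ _ _ (names.length + 2) hval names _ k.toNat (by simp)]
  have hrep : (List.replicate (names.length + 2) false).getD k.toNat false = false := by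
    simp [List.getD_eq_getElem?_getD]
  rw [hrep]
  have hcast : ((k.toNat : Nat) : Int) = k := Int.toNat_of_nonneg (by omega)
  simp only [Bool.false_or, List.any_eq_true, beq_iff_eq, hcast,
    PySem.Set.mem_ofList, List.mem_map]
  constructor
  · rintro ⟨nm, hnm, hget⟩
    exact ⟨nm, hnm, (uqnGet_some base names.length nm hk1 hk2).mp hget⟩
  · rintro ⟨nm, hnm, hkey⟩
    exact ⟨nm, hnm, (uqnGet_some base names.length nm hk1 hk2).mpr hkey⟩


theorem loopsAB (base : String) (ci : PySem.Set String) (taken : List Bool) :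
    ∀ (fa fb : Nat) (i j : Int), i ≤ j → (j - i).toNat < fa → (j - i).toNat < fb →
      uqnKey base j ∉ ci →
      (∀ k, i ≤ k → k ≤ j → (uqnKey base k ∈ ci ↔ taken.getD k.toNat false = true)) →
      uqnLoopA base ci fa i = base ++ " " ++ PySem.Int.toStr (uqnScan taken fb i) := by
  intro fa
  induction fa with
  | zero => intro fb i j hij hfa _ _ _; omega
  | succ fa ih =>
    intro fb i j hij hfa hfb hfree hagr
    cases fb with
    | zero => omega
    | succ fb =>
      simp only [uqnLoopA, uqnScan]
      by_cases hm : uqnKey base i ∈ ci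
      · have hnij : i ≠ j := by
          rintro rfl
          exact hfree hm
        have ht : taken.getD i.toNat false = true := (hagr i le_rfl hij).mp hm
        rw [if_pos (show PySem.Str.lower (base ++ " " ++ PySem.Int.toStr i) ∈ ci from hm),
          if_pos ht]
        exact ih fb (i + 1) j (by omega) (by omega) (by omega) hfree
          (fun k hk1 hk2 => hagr k (by omega) hk2)
      · have ht : taken.getD i.toNat false = false := by
          cases hEq : taken.getD i.toNat false
          · rfl
          · exact absurd ((hagr i le_rfl hij).mpr hEq) hm
        rw [if_neg (show PySem.Str.lower (base ++ " " ++ PySem.Int.toStr i) ∉ ci from hm),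
          if_neg (by rw [ht]; simp)]

-- ===== VERDICT (by name: the statement is the Claim_ definition above) =====
theorem unique_qb_name_spec : Claim_equal_unique_qb_name := by
  intro base names _
  show unique_qb_name base names = unique_qb_name_alt base names
  unfold unique_qb_name unique_qb_name_alt
  obtain ⟨j, hj1, hj2, hjfree⟩ := pigeonhole_free base names
  exact loopsAB base _ _ (names.length + 1) (names.length + 2) 1 j hj1
    (by omega) (by omega) hjfree
    (fun k hk1 hk2 => (taken_getD base names hk1 (by omega)).symm)
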